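-- pv_equiv track=rewrite | github.com/FranBretones/Proyecto-Oscars | src/functions files/web_scraping_functions.py | film_url_fixed
-- ===== SOURCE A (Python) =====
-- def film_url_fixed(film_name):
--     """
--     Converts a film name into a URL-friendly format by applying the following transformations:
--     - Removes leading articles ("The ", "A ") and appends them at the end (e.g., "The Matrix" -> "Matrix, The").
--     - Replaces special characters such as "&" with "and".
--     - Replaces spaces, colons, commas, question marks, slashes, and parentheses with hyphens ("-").
--     - Removes periods, apostrophes, and exclamation marks.
--
--     Args:
--         film_name (str): The original name of the film.
--
--     Returns:
--         str: The transformed, URL-friendly film name.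
--     """
--     film_name = film_name.strip()
--
--     if film_name.startswith("The "):
--         film_name = film_name[4:] + ", The"
--     elif film_name.startswith("A "):
--         film_name = film_name[2:] + ", A"
--
--     film_name = film_name.replace("&", "and")
--     for char in [" ", ":", ",",  "?","/", "(", ")"]:
--         film_name = film_name.replace(char, "-")
--     for char1 in [".", "'", "!",]:
--         film_name = film_name.replace(char1, "")
--     return film_name
-- ===== SOURCE B (Python) =====
-- def film_url_fixed(film_name):
--     film_name = film_name.strip()
--
--     if film_name.startswith("The "):
--         film_name = film_name[4:] + ", The"
--     elif film_name.startswith("A "):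
--         film_name = film_name[2:] + ", A"
--
--     # single left-to-right pass: classify each character and build the output
--     # with an explicit accumulator instead of A's eleven whole-string replace passes
--     out = []
--     for c in film_name:
--         if c == "&":
--             out.append("and")
--         elif c in " :,?/()":
--             out.append("-")
--         elif c in ".'!":
--             pass  # dropped
--         else:
--             out.append(c)
--     return "".join(out)
-- ===== Notes on version B (the rewrite author's own statement) =====
-- stated objective: alternative
-- what changed: A rewrites the whole string eleven times via staged str.replace passes; B makes a single left-to-right pass with an explicit accumulator list, classifying each character by an if/elif chain (expand '&', hyphenate separators, drop punctuation, keep the rest) and joining once at the end; correct because no replacement output character is itself a replaced character, so simultaneous per-character classification equals A's sequential passes.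
import Mathlib
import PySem

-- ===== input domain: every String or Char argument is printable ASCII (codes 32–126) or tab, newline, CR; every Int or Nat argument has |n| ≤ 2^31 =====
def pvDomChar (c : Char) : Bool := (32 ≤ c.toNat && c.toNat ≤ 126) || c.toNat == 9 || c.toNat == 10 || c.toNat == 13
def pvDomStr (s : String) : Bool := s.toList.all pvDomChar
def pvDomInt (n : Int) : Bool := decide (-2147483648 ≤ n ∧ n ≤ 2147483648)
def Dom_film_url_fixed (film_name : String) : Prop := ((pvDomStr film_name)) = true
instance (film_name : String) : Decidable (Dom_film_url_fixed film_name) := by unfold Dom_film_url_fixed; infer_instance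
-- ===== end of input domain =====

-- B replaces A's eleven staged whole-string .replace passes by one left-to-right pass
-- with an explicit accumulator that classifies each character (objective: alternative;
-- same return value).

-- ===== PORT A =====
def film_url_fixed (film_name : String) : String :=
  let s0 := PySem.Chars.strip film_name.toList
  let s1 :=
    if PySem.Chars.startswith s0 "The ".toList then
      PySem.List.slice s0 (some 4) none ++ ", The".toList
    else if PySem.Chars.startswith s0 "A ".toList then
      PySem.List.slice s0 (some 2) none ++ ", A".toList
    else s0
  let s2 := PySem.Chars.replace s1 "&".toList "and".toList
  let s3 := [" ", ":", ",", "?", "/", "(", ")"].foldl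
      (fun t ch => PySem.Chars.replace t ch.toList "-".toList) s2
  let s4 := [".", "'", "!"].foldl
      (fun t ch => PySem.Chars.replace t ch.toList "".toList) s3
  String.ofList s4

-- ===== PORT B =====
def film_url_fixed_alt (film_name : String) : String :=
  let s0 := PySem.Chars.strip film_name.toList
  let s1 :=
    if PySem.Chars.startswith s0 "The ".toList then
      PySem.List.slice s0 (some 4) none ++ ", The".toList
    else if PySem.Chars.startswith s0 "A ".toList then
      PySem.List.slice s0 (some 2) none ++ ", A".toList
    else s0
  -- the for loop over the characters with the accumulator list 'out';
  -- 'c in " :,?/()"' is exact as list membership since c is a single character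
  let out := s1.foldl (fun acc c =>
      if c = '&' then acc ++ "and".toList
      else if (" :,?/()".toList.contains c) then acc ++ ['-']
      else if (".'!".toList.contains c) then acc
      else acc ++ [c]) []
  String.ofList out

-- ===== PRECONDITION & SPEC =====
def Spec_film_url_fixed (film_name : String) (out : String) : Prop := out = film_url_fixed_alt film_name
instance (film_name : String) (out : String) : Decidable (Spec_film_url_fixed film_name out) := by unfold Spec_film_url_fixed; infer_instance

-- ===== CLAIM (what is proved, stated in full; the proofs are below) =====
def Claim_equal_film_url_fixed : Prop := ∀ (film_name : String), Dom_film_url_fixed film_name → Spec_film_url_fixed film_name (film_url_fixed film_name)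

-- ===== LEMMAS AND PROOFS =====

-- B's per-character classification, as a function List Char → List Char
def pvClassify (c : Char) : List Char :=
  if c = '&' then "and".toList
  else if (" :,?/()".toList.contains c) then ['-']
  else if (".'!".toList.contains c) then []
  else [c]

-- Chars.replace with a single-character pattern is a per-character flatMap
theorem pv_go_single (o : Char) (new : List Char) :
    ∀ (l : List Char) (fuel : Nat) (acc : List Char), l.length ≤ fuel →
      PySem.Chars.replace.go [o] new fuel l acc
        = acc.reverse ++ l.flatMap (fun x => if x = o then new else [x]) := by
  intro l
  induction l with
  | nil => intro fuel acc _; cases fuel <;> simp [PySem.Chars.replace.go]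
  | cons c t ih =>
    intro fuel acc hle
    match fuel with
    | 0 => simp at hle
    | Nat.succ f =>
      rw [PySem.Chars.replace.go]
      by_cases h : c = o
      · subst h
        have hp : [c].isPrefixOf (c :: t) = true := by simp [List.isPrefixOf]
        rw [hp, if_pos rfl]
        simp only [List.length_cons, List.length_nil, Nat.zero_add, List.drop_succ_cons,
          List.drop_zero]
        rw [ih f (new.reverse ++ acc) (by simpa using hle)]
        simp
      · have hp : [o].isPrefixOf (c :: t) = false := by
          simp [List.isPrefixOf]; exact fun hh => (h hh.symm).elim
        rw [hp, if_neg (by simp)]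
        rw [ih f (c :: acc) (by simpa using hle)]
        simp [h]

theorem pv_replace_single (l : List Char) (o : Char) (new : List Char) :
    PySem.Chars.replace l [o] new = l.flatMap (fun x => if x = o then new else [x]) := by
  simp only [PySem.Chars.replace, List.isEmpty_cons, Bool.false_eq_true, if_false]
  simpa using pv_go_single o new l l.length [] le_rfl

-- A's whole replace pipeline, on any character list, is one flatMap of B's classification
theorem pv_pipeline_eq (l : List Char) :
    [".", "'", "!"].foldl (fun t ch => PySem.Chars.replace t ch.toList "".toList)
      ([" ", ":", ",", "?", "/", "(", ")"].foldl
        (fun t ch => PySem.Chars.replace t ch.toList "-".toList)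
        (PySem.Chars.replace l "&".toList "and".toList))
      = l.flatMap pvClassify := by
  simp only [List.foldl,
    show ("&".toList : List Char) = ['&'] from rfl,
    show (" ".toList : List Char) = [' '] from rfl,
    show (":".toList : List Char) = [':'] from rfl,
    show (",".toList : List Char) = [','] from rfl,
    show ("?".toList : List Char) = ['?'] from rfl,
    show ("/".toList : List Char) = ['/'] from rfl,
    show ("(".toList : List Char) = ['('] from rfl,
    show (")".toList : List Char) = [')'] from rfl,
    show (".".toList : List Char) = ['.'] from rfl,
    show ("'".toList : List Char) = ['\''] from rfl,
    show ("!".toList : List Char) = ['!'] from rfl]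
  rw [pv_replace_single, pv_replace_single, pv_replace_single, pv_replace_single,
      pv_replace_single, pv_replace_single, pv_replace_single, pv_replace_single,
      pv_replace_single, pv_replace_single, pv_replace_single]
  simp only [List.flatMap_assoc]
  have hfun : ∀ c : Char,
      (List.flatMap (fun x9 => List.flatMap (fun x8 => List.flatMap (fun x7 =>
        List.flatMap (fun x6 => List.flatMap (fun x5 => List.flatMap (fun x4 =>
        List.flatMap (fun x3 => List.flatMap (fun x2 => List.flatMap (fun x1 =>
        List.flatMap (fun x0 => if x0 = '!' then "".toList else [x0])
          (if x1 = '\'' then "".toList else [x1]))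
          (if x2 = '.' then "".toList else [x2]))
          (if x3 = ')' then "-".toList else [x3]))
          (if x4 = '(' then "-".toList else [x4]))
          (if x5 = '/' then "-".toList else [x5]))
          (if x6 = '?' then "-".toList else [x6]))
          (if x7 = ',' then "-".toList else [x7]))
          (if x8 = ':' then "-".toList else [x8]))
          (if x9 = ' ' then "-".toList else [x9]))
          (if c = '&' then "and".toList else [c]))
      = pvClassify c := by
    intro c
    by_cases h0 : c = '&'; · subst h0; decide
    by_cases h1 : c = ' '; · subst h1; decide
    by_cases h2 : c = ':'; · subst h2; decide
    by_cases h3 : c = ','; · subst h3; decide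
    by_cases h4 : c = '?'; · subst h4; decide
    by_cases h5 : c = '/'; · subst h5; decide
    by_cases h6 : c = '('; · subst h6; decide
    by_cases h7 : c = ')'; · subst h7; decide
    by_cases h8 : c = '.'; · subst h8; decide
    by_cases h9 : c = '\''; · subst h9; decide
    by_cases h10 : c = '!'; · subst h10; decide
    have hA : (" :,?/()".toList.contains c) = false := by
      simp [h1, h2, h3, h4, h5, h6, h7]
    have hB : (".'!".toList.contains c) = false := by
      simp [h8, h9, h10]
    simp only [pvClassify, h0, hA, hB, Bool.false_eq_true, if_false]
    simp [h0, h1, h2, h3, h4, h5, h6, h7, h8, h9, h10]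
  exact List.flatMap_congr (fun c _ => hfun c)

-- B's accumulator loop is that same flatMap
theorem pv_loop_eq (l : List Char) :
    l.foldl (fun acc c =>
      if c = '&' then acc ++ "and".toList
      else if (" :,?/()".toList.contains c) then acc ++ ['-']
      else if (".'!".toList.contains c) then acc
      else acc ++ [c]) []
      = l.flatMap pvClassify := by
  have h : l.foldl (fun acc c =>
      if c = '&' then acc ++ "and".toList
      else if (" :,?/()".toList.contains c) then acc ++ ['-']
      else if (".'!".toList.contains c) then acc
      else acc ++ [c]) []
      = l.foldl (fun acc c => acc ++ pvClassify c) [] := by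
    apply PySem.List.foldl_congr_mem
    intro acc c _
    unfold pvClassify
    split_ifs <;> simp
  rw [h, PySem.List.foldl_append_eq_flatMap]
  simp

-- ===== VERDICT (by name: the statement is the Claim_ definition above) =====
theorem film_url_fixed_spec : Claim_equal_film_url_fixed := by
  intro s _
  unfold Spec_film_url_fixed film_url_fixed film_url_fixed_alt
  dsimp only
  rw [pv_loop_eq]
  exact congrArg String.ofList (pv_pipeline_eq _)
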